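-- pv_equiv track=rewrite | github.com/matuspintek-boop/ib111 | 09/d5_cycle.py | cycle_detect
-- ===== SOURCE A (Python) =====
-- def cycle_detect(numbers: list[int], index: int,
--                  visited: set[int]) -> int | None:
--
--     # Podobně jako v předchozím, nejprve vyřešíme jednoduché
--     # případy: je-li ‹index› mimo meze seznamu ‹numbers›, není co
--     # řešit: vracíme ‹None›.
--
--     if index < 0 or index >= len(numbers):
--         return None
--
--     # Naopak, je-li ‹index› přítomen v množině ‹visited›, víme, že
--     # se během výpočtu zopakoval a můžeme jej tedy vrátit.
--
--     if index in visited: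
--         return index
--
--     # Ve zbývajících případech nemůžeme přímo rozhodnout. Můžeme ale
--     # aktuální index označit za navštívený, provést krok výpočtu, a
--     # novou instanci problému prohlásit za jednodušší: díky tomu
--     # můžeme zbytek práce bezpečně delegovat na rekurzivní volání
--     # ‹cycle_detect›.
--
--     # Vzhledem k předchozímu víme, že ‹index› dosud nebyl
--     # navštívený, tedy jeho přidáním se množina ‹visited› zvětší
--     # o 1, a tedy počet nenavštívených indexů o 1 klesne. Víme tedy,
--     # že takto formulovaná nová instance je blíže elementárnímu
--     # případu než ta stávající.
--
--     jump_to = index + numbers[index]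
--     return cycle_detect(numbers, jump_to, visited | {index})
-- ===== SOURCE B (Python) =====
-- def cycle_detect(numbers: list[int], index: int,
--                  visited: set[int]) -> int | None:
--     # Iterative version: explicit loop instead of recursion; copy the
--     # incoming set so the caller's set is never mutated.
--     visited = set(visited)
--     # At most len(numbers) unvisited in-range indices exist, so the loop
--     # returns within len(numbers) + 1 iterations.
--     for _ in range(len(numbers) + 1):
--         if index < 0 or index >= len(numbers):
--             return None
--         if index in visited:
--             return index
--         visited.add(index)
--         index = index + numbers[index]
-- ===== Notes on version B (the rewrite author's own statement) =====
-- stated objective: simpler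
-- what changed: Replaces the tail recursion (which rebuilds the visited set with a union on each call) with an explicit bounded loop over a locally copied set updated in place.
import Mathlib
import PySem

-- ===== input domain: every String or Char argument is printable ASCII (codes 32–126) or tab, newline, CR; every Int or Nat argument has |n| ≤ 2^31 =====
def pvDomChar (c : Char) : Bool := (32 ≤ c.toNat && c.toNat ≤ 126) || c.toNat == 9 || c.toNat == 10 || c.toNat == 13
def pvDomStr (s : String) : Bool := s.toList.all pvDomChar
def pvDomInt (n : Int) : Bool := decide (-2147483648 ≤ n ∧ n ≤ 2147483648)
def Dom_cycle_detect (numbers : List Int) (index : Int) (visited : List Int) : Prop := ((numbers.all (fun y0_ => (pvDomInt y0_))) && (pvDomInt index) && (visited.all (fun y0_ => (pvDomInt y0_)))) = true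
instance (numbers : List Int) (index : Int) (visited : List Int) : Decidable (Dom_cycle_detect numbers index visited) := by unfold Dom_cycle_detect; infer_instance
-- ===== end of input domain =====

-- B replaces A's tail recursion (union-rebuilding the visited set each call) with an
-- explicit bounded loop over a copied set updated in place; objective: simpler.


-- ===== PORT A =====
-- Termination measure for A's recursion: the in-range indices of `numbers` …
def pvIdx (numbers : List Int) : List Int :=
  (List.range numbers.length).map (fun n : Nat => (n : Int))

-- … not yet in the visited set.
def pvMeas (numbers : List Int) (v : List Int) : Nat :=
  ((pvIdx numbers).filter (fun n => !(PySem.Set.contains v n))).length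

theorem mem_pvIdx (numbers : List Int) (x : Int) :
    x ∈ pvIdx numbers ↔ 0 ≤ x ∧ x < (numbers.length : Int) := by
  unfold pvIdx
  simp only [List.mem_map]
  constructor
  · rintro ⟨n, hn, rfl⟩
    rw [List.mem_range] at hn
    omega
  · rintro ⟨h0, h1⟩
    exact ⟨x.toNat, List.mem_range.mpr (by omega), by omega⟩

-- cited by A's `decreasing_by`: adding the (unvisited, in-range) current index shrinks the measure
theorem pvMeas_union_lt (numbers : List Int) (v : List Int) (index : Int)
    (h0 : 0 ≤ index) (h1 : index < (numbers.length : Int)) (h2 : index ∉ v) :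
    pvMeas numbers (PySem.Set.union v [index]) < pvMeas numbers v := by
  unfold pvMeas
  have hf : (pvIdx numbers).filter (fun n => !(PySem.Set.contains (PySem.Set.union v [index]) n))
      = ((pvIdx numbers).filter (fun n => !(PySem.Set.contains v n))).filter
          (fun n => !(n == index)) := by
    rw [List.filter_filter]
    apply List.filter_congr
    intro n _
    by_cases h : n ∈ v <;> by_cases h' : n = index <;>
      simp [PySem.Set.mem_union, h, h']
  rw [hf]
  apply List.length_filter_lt_length_iff_exists.mpr
  refine ⟨index, ?_, by simp⟩
  rw [List.mem_filter]
  exact ⟨(mem_pvIdx numbers index).mpr ⟨h0, h1⟩, by simp [h2]⟩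

def cycle_detect (numbers : List Int) (index : Int) (visited : List Int) : Option Int :=
  if index < 0 || (numbers.length : Int) ≤ index then none
  else if PySem.Set.contains visited index then some index
  else
    let jump_to := index + PySem.List.pyGetD numbers index 0
    cycle_detect numbers jump_to (PySem.Set.union visited [index])
termination_by pvMeas numbers visited
decreasing_by
  rename_i h1 h2
  simp only [Bool.or_eq_true, decide_eq_true_eq, not_or] at h1
  exact pvMeas_union_lt numbers visited index (by omega) (by omega)
    (fun hm => h2 ((PySem.Set.contains_iff _ _).mpr hm))

-- ===== PORT B =====
-- the `for _ in range(len(numbers)+1)` loop of Source B, remaining iteration count first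
def pvLoop (numbers : List Int) : Nat → Int → List Int → Option Int
  | 0, _, _ => none
  | fuel + 1, index, visited =>
    if index < 0 || (numbers.length : Int) ≤ index then none
    else if PySem.Set.contains visited index then some index
    else pvLoop numbers fuel (index + PySem.List.pyGetD numbers index 0)
           (PySem.Set.add visited index)

def cycle_detect_alt (numbers : List Int) (index : Int) (visited : List Int) : Option Int :=
  pvLoop numbers (numbers.length + 1) index (PySem.Set.ofList visited)

-- ===== PRECONDITION & SPEC =====
def Spec_cycle_detect (numbers : List Int) (index : Int) (visited : List Int) (out : Option Int) : Prop := out = cycle_detect_alt numbers index visited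
instance (numbers : List Int) (index : Int) (visited : List Int) (out : Option Int) : Decidable (Spec_cycle_detect numbers index visited out) := by unfold Spec_cycle_detect; infer_instance

-- ===== CLAIM (what is proved, stated in full; the proofs are below) =====
def Claim_equal_cycle_detect : Prop := ∀ (numbers : List Int) (index : Int) (visited : List Int), Dom_cycle_detect numbers index visited → Spec_cycle_detect numbers index visited (cycle_detect numbers index visited)

-- ===== LEMMAS AND PROOFS =====

-- the loop with enough fuel computes A's recursion, for any visited list with the same members
theorem pvLoop_eq (numbers : List Int) (fuel : Nat) :
    ∀ (index : Int) (s v : List Int), (∀ x : Int, x ∈ s ↔ x ∈ v) →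
    pvMeas numbers v < fuel →
    pvLoop numbers fuel index s = cycle_detect numbers index v := by
  induction fuel with
  | zero => intro _ _ _ _ hlt; omega
  | succ fuel ih =>
    intro index s v hmem hlt
    rw [pvLoop, cycle_detect]
    by_cases hout : (index < 0 || decide ((numbers.length : Int) ≤ index)) = true
    · rw [if_pos hout, if_pos hout]
    · rw [if_neg hout, if_neg hout]
      by_cases hv : index ∈ v
      · rw [if_pos ((PySem.Set.contains_iff _ _).mpr ((hmem index).mpr hv)),
          if_pos ((PySem.Set.contains_iff _ _).mpr hv)]
      · have hs : index ∉ s := fun h => hv ((hmem index).mp h)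
        rw [if_neg (fun h => hs ((PySem.Set.contains_iff _ _).mp h)),
          if_neg (fun h => hv ((PySem.Set.contains_iff _ _).mp h))]
        have h0 : 0 ≤ index ∧ index < (numbers.length : Int) := by
          simp only [Bool.or_eq_true, decide_eq_true_eq, not_or] at hout; omega
        have hmem' : ∀ x : Int, x ∈ PySem.Set.add s index ↔ x ∈ PySem.Set.union v [index] := by
          intro x
          rw [PySem.Set.mem_add, PySem.Set.mem_union]
          simp [hmem x]
        have hdec : pvMeas numbers (PySem.Set.union v [index]) < pvMeas numbers v :=
          pvMeas_union_lt numbers v index h0.1 h0.2 hv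
        exact ih _ _ _ hmem' (by omega)

theorem pvMeas_le (numbers : List Int) (v : List Int) :
    pvMeas numbers v ≤ numbers.length := by
  have h := List.length_filter_le (fun n => !(PySem.Set.contains v n)) (pvIdx numbers)
  have h2 : (pvIdx numbers).length = numbers.length := by
    unfold pvIdx; simp
  unfold pvMeas; omega

-- ===== VERDICT (by name: the statement is the Claim_ definition above) =====
theorem cycle_detect_spec : Claim_equal_cycle_detect := by
  intro numbers index visited _
  unfold Spec_cycle_detect cycle_detect_alt
  refine (pvLoop_eq numbers (numbers.length + 1) index (PySem.Set.ofList visited) visited ?_ ?_).symm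
  · intro x; exact PySem.Set.mem_ofList _ _
  · have := pvMeas_le numbers visited; omega
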